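-- pv_equiv track=rewrite | github.com/Nikhithareddy45/LegalLensAI | api/app.py | suggest_from_risks
-- ===== SOURCE A (Python) =====
-- def suggest_from_risks(risks):
--     templates = {
--         "termination": [
--             "What is the termination notice period?",
--             "Can termination occur without cause?"
--         ],
--         "liability": [
--             "What liability caps or exclusions apply?"
--         ],
--         "indemnity": [
--             "What indemnity obligations are specified?"
--         ],
--         "renewal": [
--             "Are there automatic renewal terms?",
--             "How can renewal be prevented?"
--         ],
--         "confidentiality": [
--             "What confidentiality obligations and exceptions are defined?"
--         ],
--         "payment terms": [
--             "What are payment terms and deadlines?",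
--             "Are late fees or interest specified?"
--         ],
--         "jurisdiction": [
--             "Which jurisdiction applies?",
--             "How are disputes resolved?"
--         ],
--         "governing law": [
--             "What is the governing law?"
--         ],
--         "notice period": [
--             "What are notice periods for key actions?"
--         ]
--     }
--     order = {"High": 3, "Medium": 2, "Low": 1}
--     risks_sorted = sorted(risks, key=lambda r: -order.get(r.get("weight","Low"),1))
--     qs = []
--     seen = set()
--     for r in risks_sorted:
--         k = r.get("type","")
--         for q in templates.get(k, []):
--             if q not in seen:
--                 seen.add(q)
--                 qs.append(q)
--         if len(qs) >= 8:
--             break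
--     if not qs:
--         qs = [
--             "What are the key obligations and risks?",
--             "What are payment terms and termination conditions?"
--         ]
--     return qs
-- ===== SOURCE B (Python) =====
-- def suggest_from_risks(risks):
--     templates = {
--         "termination": [
--             "What is the termination notice period?",
--             "Can termination occur without cause?"
--         ],
--         "liability": [
--             "What liability caps or exclusions apply?"
--         ],
--         "indemnity": [
--             "What indemnity obligations are specified?"
--         ],
--         "renewal": [
--             "Are there automatic renewal terms?",
--             "How can renewal be prevented?"
--         ],
--         "confidentiality": [
--             "What confidentiality obligations and exceptions are defined?"
--         ],
--         "payment terms": [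
--             "What are payment terms and deadlines?",
--             "Are late fees or interest specified?"
--         ],
--         "jurisdiction": [
--             "Which jurisdiction applies?",
--             "How are disputes resolved?"
--         ],
--         "governing law": [
--             "What is the governing law?"
--         ],
--         "notice period": [
--             "What are notice periods for key actions?"
--         ]
--     }
--     # three-bucket stable counting sort replaces the comparison sort
--     high, medium, low = [], [], []
--     for r in risks:
--         w = r.get("weight", "Low")
--         if w == "High":
--             high.append(r)
--         elif w == "Medium":
--             medium.append(r)
--         else:
--             low.append(r)
--     qs = []
--     seen = set()
--     for r in high + medium + low:
--         for q in templates.get(r.get("type", ""), []):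
--             if q not in seen:
--                 seen.add(q)
--                 qs.append(q)
--         if len(qs) >= 8:
--             break
--     if not qs:
--         qs = [
--             "What are the key obligations and risks?",
--             "What are payment terms and termination conditions?"
--         ]
--     return qs
-- ===== Notes on version B (the rewrite author's own statement) =====
-- stated objective: alternative
-- what changed: Replaces the comparison sort keyed by -order.get(weight,1) with a single stable three-bucket (High/Medium/other) counting-sort pass, concatenating high+medium+low; the question-collecting loop is unchanged.
import Mathlib
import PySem

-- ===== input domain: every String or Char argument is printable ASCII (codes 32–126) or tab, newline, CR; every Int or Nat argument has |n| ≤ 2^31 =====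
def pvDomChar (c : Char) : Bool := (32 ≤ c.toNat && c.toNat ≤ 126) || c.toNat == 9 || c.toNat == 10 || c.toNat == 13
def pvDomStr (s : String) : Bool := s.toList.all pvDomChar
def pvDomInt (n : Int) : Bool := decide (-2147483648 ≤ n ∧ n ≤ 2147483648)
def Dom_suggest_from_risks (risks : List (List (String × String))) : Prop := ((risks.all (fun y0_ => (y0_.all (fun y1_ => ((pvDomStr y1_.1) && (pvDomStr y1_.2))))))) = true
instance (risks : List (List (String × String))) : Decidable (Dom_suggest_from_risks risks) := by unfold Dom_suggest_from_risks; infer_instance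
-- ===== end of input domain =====

-- B replaces A's comparison sort of the risks by a one-pass three-bucket (High/Medium/other)
-- stable counting sort (objective: alternative algorithm); identical output.

-- ===== PORT A =====

-- the templates dict (identical literal in both Pythons)
def templatesD : PySem.Dict String (List String) :=
  ⟨[ ("termination", ["What is the termination notice period?", "Can termination occur without cause?"])
  , ("liability", ["What liability caps or exclusions apply?"])
  , ("indemnity", ["What indemnity obligations are specified?"])
  , ("renewal", ["Are there automatic renewal terms?", "How can renewal be prevented?"])
  , ("confidentiality", ["What confidentiality obligations and exceptions are defined?"])
  , ("payment terms", ["What are payment terms and deadlines?", "Are late fees or interest specified?"])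
  , ("jurisdiction", ["Which jurisdiction applies?", "How are disputes resolved?"])
  , ("governing law", ["What is the governing law?"])
  , ("notice period", ["What are notice periods for key actions?"]) ]⟩

def orderD : PySem.Dict String Int := ⟨[("High", 3), ("Medium", 2), ("Low", 1)]⟩

-- key=lambda r: -order.get(r.get("weight","Low"),1)
def keyA (r : List (String × String)) : Int :=
  -(PySem.Dict.getD orderD (PySem.Dict.getD ⟨r⟩ "weight" "Low") 1)

-- the question-collecting loop (textually identical in A's Python and Source B):
-- for r in …: for q in templates.get(r.get("type",""), []): if q not in seen: add/append; break once len(qs) >= 8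
def collectQs : List (List (String × String)) → List String → PySem.Set String → List String
  | [], qs, _ => qs
  | r :: rest, qs, seen =>
      let k := PySem.Dict.getD ⟨r⟩ "type" ""
      let st := (PySem.Dict.getD templatesD k []).foldl
        (fun (p : List String × PySem.Set String) q =>
          if p.2.contains q then p else (p.1 ++ [q], PySem.Set.add p.2 q)) (qs, seen)
      if 8 ≤ st.1.length then st.1 else collectQs rest st.1 st.2

def fallbackQs : List String :=
  ["What are the key obligations and risks?", "What are payment terms and termination conditions?"]

def suggest_from_risks (risks : List (List (String × String))) : List String :=
  let risks_sorted := PySem.List.sorted risks keyA false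
  let qs := collectQs risks_sorted [] PySem.Set.empty
  if qs = [] then fallbackQs else qs

-- ===== PORT B =====

-- one pass over risks, appending each risk to the bucket its weight selects
def bucketStep (acc : List (List (String × String)) × List (List (String × String)) × List (List (String × String)))
    (r : List (String × String)) :
    List (List (String × String)) × List (List (String × String)) × List (List (String × String)) :=
  let w := PySem.Dict.getD ⟨r⟩ "weight" "Low"
  if w == "High" then (acc.1 ++ [r], acc.2.1, acc.2.2)
  else if w == "Medium" then (acc.1, acc.2.1 ++ [r], acc.2.2)
  else (acc.1, acc.2.1, acc.2.2 ++ [r])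

def suggest_from_risks_alt (risks : List (List (String × String))) : List String :=
  let hml := risks.foldl bucketStep ([], [], [])
  let qs := collectQs (hml.1 ++ hml.2.1 ++ hml.2.2) [] PySem.Set.empty
  if qs = [] then fallbackQs else qs

-- ===== PRECONDITION & SPEC =====
def Spec_suggest_from_risks (risks : List (List (String × String))) (out : List String) : Prop := out = suggest_from_risks_alt risks
instance (risks : List (List (String × String))) (out : List String) : Decidable (Spec_suggest_from_risks risks out) := by unfold Spec_suggest_from_risks; infer_instance

-- ===== CLAIM (what is proved, stated in full; the proofs are below) =====
def Claim_equal_suggest_from_risks : Prop := ∀ (risks : List (List (String × String))), Dom_suggest_from_risks risks → Spec_suggest_from_risks risks (suggest_from_risks risks)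

-- ===== LEMMAS AND PROOFS =====

def wHigh (r : List (String × String)) : Bool := PySem.Dict.getD ⟨r⟩ "weight" "Low" == "High"
def wMed (r : List (String × String)) : Bool := PySem.Dict.getD ⟨r⟩ "weight" "Low" == "Medium"

lemma orderD_getD (w : String) :
    PySem.Dict.getD orderD w 1 = if w == "High" then 3 else if w == "Medium" then 2 else 1 := by
  by_cases h1 : w = "High"
  · subst h1; rfl
  · by_cases h2 : w = "Medium"
    · subst h2; rfl
    · by_cases h3 : w = "Low"
      · subst h3; rfl
      · have e1 : ("High" == w) = false := beq_eq_false_iff_ne.mpr (Ne.symm h1)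
        have e2 : ("Medium" == w) = false := beq_eq_false_iff_ne.mpr (Ne.symm h2)
        have e3 : ("Low" == w) = false := beq_eq_false_iff_ne.mpr (Ne.symm h3)
        have f1 : (w == "High") = false := beq_eq_false_iff_ne.mpr h1
        have f2 : (w == "Medium") = false := beq_eq_false_iff_ne.mpr h2
        simp [PySem.Dict.getD, PySem.Dict.get?, orderD, List.find?, e1, e2, e3, f1, f2]

lemma keyA_eq (r : List (String × String)) :
    keyA r = if wHigh r then -3 else if wMed r then -2 else -1 := by
  unfold keyA wHigh wMed
  rw [orderD_getD]
  split_ifs <;> simp_all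

lemma keyA_cases (r : List (String × String)) : keyA r = -3 ∨ keyA r = -2 ∨ keyA r = -1 := by
  rw [keyA_eq]; split_ifs <;> simp

lemma insertBy_append {α : Type} (before : α → α → Bool) (x : α) (A C : List α)
    (h : ∀ a ∈ A, before x a = false) :
    PySem.List.insertBy before x (A ++ C) = A ++ PySem.List.insertBy before x C := by
  induction A with
  | nil => simp
  | cons a A ih =>
      have ha := h a (by simp)
      simp only [List.cons_append, PySem.List.insertBy, ha]
      simp only [Bool.false_eq_true, if_false, List.cons.injEq, true_and]
      exact ih (fun b hb => h b (by simp [hb]))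

lemma insertBy_all_before {α : Type} (before : α → α → Bool) (x : α) (C : List α)
    (h : ∀ c ∈ C, before x c = true) :
    PySem.List.insertBy before x C = x :: C := by
  cases C with
  | nil => rfl
  | cons c C => simp [PySem.List.insertBy, h c (by simp)]

-- the stable insertion sort over keys in {-3,-2,-1} yields the three filters, concatenated
lemma foldl_insertBy_buckets (xs A B C : List (List (String × String)))
    (hA : ∀ a ∈ A, keyA a = -3) (hB : ∀ b ∈ B, keyA b = -2) (hC : ∀ c ∈ C, keyA c = -1) :
    xs.foldl (fun acc x => PySem.List.insertBy (fun a b => decide (keyA a < keyA b)) x acc) (A ++ B ++ C)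
    = (A ++ xs.filter (fun r => keyA r == -3)) ++ (B ++ xs.filter (fun r => keyA r == -2))
        ++ (C ++ xs.filter (fun r => keyA r == -1)) := by
  induction xs generalizing A B C with
  | nil => simp
  | cons x xs ih =>
      simp only [List.foldl_cons, List.filter_cons]
      rcases keyA_cases x with hx | hx | hx
      · have e1 : PySem.List.insertBy (fun a b => decide (keyA a < keyA b)) x (A ++ B ++ C)
            = (A ++ [x]) ++ B ++ C := by
          rw [List.append_assoc, insertBy_append _ _ A (B ++ C)
            (by intro a ha; simp [hx, hA a ha]),
            insertBy_all_before _ _ (B ++ C)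
            (by intro c hc; rcases List.mem_append.1 hc with h | h
                · simp [hx, hB c h]
                · simp [hx, hC c h])]
          simp
        rw [e1, ih (A ++ [x]) B C
          (by intro a ha; rcases List.mem_append.1 ha with h | h
              · exact hA a h
              · simp at h; subst h; exact hx)
          hB hC]
        simp [hx, List.append_assoc]
      · have e1 : PySem.List.insertBy (fun a b => decide (keyA a < keyA b)) x (A ++ B ++ C)
            = A ++ (B ++ [x]) ++ C := by
          rw [insertBy_append _ _ (A ++ B) C
            (by intro a ha; rcases List.mem_append.1 ha with h | h
                · simp [hx, hA a h]
                · simp [hx, hB a h]),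
            insertBy_all_before _ _ C (by intro c hc; simp [hx, hC c hc])]
          simp
        rw [e1, ih A (B ++ [x]) C hA
          (by intro b hb; rcases List.mem_append.1 hb with h | h
              · exact hB b h
              · simp at h; subst h; exact hx)
          hC]
        simp [hx, List.append_assoc]
      · have e1 : PySem.List.insertBy (fun a b => decide (keyA a < keyA b)) x (A ++ B ++ C)
            = A ++ B ++ (C ++ [x]) := by
          rw [PySem.List.insertBy_of_forall_not_before _ _ (A ++ B ++ C)
            (by intro a ha
                rcases List.mem_append.1 ha with h | h
                · rcases List.mem_append.1 h with h' | h'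
                  · simp [hx, hA a h']
                  · simp [hx, hB a h']
                · simp [hx, hC a h])]
          simp
        rw [e1, ih A B (C ++ [x]) hA hB
          (by intro c hc; rcases List.mem_append.1 hc with h | h
              · exact hC c h
              · simp at h; subst h; exact hx)]
        simp [hx, List.append_assoc]

-- B's single bucketing pass computes the same three filters
lemma foldl_bucketStep (xs H M L : List (List (String × String))) :
    xs.foldl bucketStep (H, M, L)
    = (H ++ xs.filter (fun r => keyA r == -3), M ++ xs.filter (fun r => keyA r == -2),
        L ++ xs.filter (fun r => keyA r == -1)) := by
  induction xs generalizing H M L with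
  | nil => simp
  | cons x xs ih =>
      simp only [List.foldl_cons, List.filter_cons]
      by_cases h1 : (PySem.Dict.getD ⟨x⟩ "weight" "Low" == "High") = true
      · simp [bucketStep, h1, ih, keyA_eq, wHigh, List.append_assoc]
      · by_cases h2 : (PySem.Dict.getD ⟨x⟩ "weight" "Low" == "Medium") = true
        · simp [bucketStep, h1, h2, ih, keyA_eq, wHigh, wMed, List.append_assoc]
        · simp [bucketStep, h1, h2, ih, keyA_eq, wHigh, wMed, List.append_assoc]

lemma sorted_eq_buckets (risks : List (List (String × String))) :
    PySem.List.sorted risks keyA false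
    = risks.filter (fun r => keyA r == -3) ++ risks.filter (fun r => keyA r == -2)
        ++ risks.filter (fun r => keyA r == -1) := by
  rw [PySem.List.sorted_eq_foldl_insertBy]
  simpa using foldl_insertBy_buckets risks [] [] []
    (by simp) (by simp) (by simp)

-- ===== VERDICT (by name: the statement is the Claim_ definition above) =====
theorem suggest_from_risks_spec : Claim_equal_suggest_from_risks := by
  intro risks _
  unfold Spec_suggest_from_risks suggest_from_risks suggest_from_risks_alt
  rw [sorted_eq_buckets, foldl_bucketStep]
  simp
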